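-- pv_equiv track=rewrite | github.com/venux021/soda | zcy2/c8/q12.py | longest_sub_seq
-- ===== SOURCE A (Python) =====
-- def longest_sub_seq(arr, k):
--     n = len(arr)
--     sums = [0] * (n+1)
--     t = 0
--     for i, v in enumerate(arr):
--         t += v
--         sums[i+1] = t
--
--     es = [0] * (n+1)
--     _m = 0
--     for i, v in enumerate(sums):
--         if v > _m:
--             _m = v
--         es[i] = _m
--
--     _len = 0
--     for i in range(1, n+1):
--         p = sums[i] - k
--         j = dofind(es, i-1, p)
--         if j != -1:
--             _len = max(_len, i - j)
--
--     return _len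
--
-- def dofind(es, j, num):
--     low = 0
--     high = j
--     while low <= high:
--         mid = (low + high) // 2
--         if es[mid] >= num:
--             high = mid - 1
--         else:
--             low = mid + 1
--     return low if low <= j else -1
-- ===== SOURCE B (Python) =====
-- def longest_sub_seq(arr, k):
--     # Simpler: scan prefix sums directly for the first index meeting the
--     # threshold instead of building a prefix-max array and binary searching it.
--     sums = [0]
--     for v in arr:
--         sums.append(sums[-1] + v)
--     best = 0
--     for i in range(1, len(sums)):
--         target = sums[i] - k
--         for j in range(i):
--             if sums[j] >= target:
--                 best = max(best, i - j)
--                 break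
--     return best
-- ===== Notes on version B (the rewrite author's own statement) =====
-- stated objective: simpler
-- what changed: Drops the prefix-max auxiliary array and the hand-written binary search: B scans the raw prefix sums directly for the first index meeting the threshold (first-match linear scan with break).
import Mathlib
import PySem

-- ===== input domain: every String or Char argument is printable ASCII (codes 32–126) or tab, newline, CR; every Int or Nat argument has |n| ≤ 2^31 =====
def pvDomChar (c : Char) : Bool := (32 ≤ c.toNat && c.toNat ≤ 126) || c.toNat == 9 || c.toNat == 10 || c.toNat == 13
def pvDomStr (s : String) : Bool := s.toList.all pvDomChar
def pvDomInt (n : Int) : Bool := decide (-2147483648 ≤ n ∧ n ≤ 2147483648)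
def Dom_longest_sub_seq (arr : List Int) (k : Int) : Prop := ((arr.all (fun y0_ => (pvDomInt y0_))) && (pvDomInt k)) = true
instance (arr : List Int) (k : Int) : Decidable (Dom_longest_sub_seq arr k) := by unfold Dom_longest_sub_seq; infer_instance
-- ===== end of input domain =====

-- B is a simpler exact re-implementation: it drops the prefix-max array and the
-- hand-written binary search, scanning the raw prefix sums for the first index
-- meeting the threshold instead (same return value; no speed claim).

-- ===== PORT A =====
-- while low <= high: mid = (low+high)//2; if es[mid] >= num: high = mid-1 else low = mid+1; returns final low
-- (es[mid] is ported as pyGet? … |>.getD 0; mid is always in range at every call A makes)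
def dofindLoop (es : List Int) (num low high : Int) : Int :=
  if _h : low ≤ high then
    if (PySem.List.pyGet? es (PySem.Int.floordiv (low + high) 2)).getD 0 ≥ num then
      dofindLoop es num low (PySem.Int.floordiv (low + high) 2 - 1)
    else
      dofindLoop es num (PySem.Int.floordiv (low + high) 2 + 1) high
  else low
termination_by (high + 1 - low).toNat
decreasing_by
  all_goals
    have hb := PySem.Int.floordiv_two_mid_bounds (lo := low) (hi := high) _h
    omega

def dofind (es : List Int) (j num : Int) : Int :=
  let low := dofindLoop es num 0 j
  if low ≤ j then low else -1

def longest_sub_seq (arr : List Int) (k : Int) : Int :=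
  let n : Int := (arr.length : Int)
  -- sums = [0]*(n+1); t = 0; for i, v in enumerate(arr): t += v; sums[i+1] = t
  let sums := ((PySem.List.enumerate arr).foldl
      (fun (st : List Int × Int) iv =>
        (PySem.List.pySetD st.1 (iv.1 + 1) (st.2 + iv.2), st.2 + iv.2))
      (List.replicate (arr.length + 1) 0, 0)).1
  -- es = [0]*(n+1); _m = 0; for i, v in enumerate(sums): if v > _m: _m = v; es[i] = _m
  let es := ((PySem.List.enumerate sums).foldl
      (fun (st : List Int × Int) iv =>
        (PySem.List.pySetD st.1 iv.1 (if iv.2 > st.2 then iv.2 else st.2),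
         if iv.2 > st.2 then iv.2 else st.2))
      (List.replicate (arr.length + 1) 0, 0)).1
  -- _len = 0; for i in range(1, n+1): p = sums[i] - k; j = dofind(es, i-1, p); if j != -1: _len = max(_len, i - j)
  (PySem.List.pyRange 1 (n + 1) 1).foldl
    (fun (l : Int) i =>
      let p := (PySem.List.pyGet? sums i).getD 0 - k
      let j := dofind es (i - 1) p
      if j ≠ -1 then max l (i - j) else l) 0

-- ===== PORT B =====
-- sums = [0]; for v in arr: sums.append(sums[-1] + v)
def bScan (t : Int) : List Int → List Int
  | [] => []
  | v :: r => (t + v) :: bScan (t + v) r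

-- for j in range(i): if sums[j] >= target: … break   — index of the first prefix sum ≥ target
def bFirst : List Int → Int → Option Int
  | [], _ => none
  | x :: r, t => if x ≥ t then some 0 else (bFirst r t).map (· + 1)

def longest_sub_seq_alt (arr : List Int) (k : Int) : Int :=
  let sums := 0 :: bScan 0 arr
  (PySem.List.pyRange 1 (sums.length : Int) 1).foldl
    (fun (best : Int) i =>
      let target := (PySem.List.pyGet? sums i).getD 0 - k
      match bFirst (sums.take i.toNat) target with
      | some j => max best (i - j)
      | none => best) 0

-- ===== PRECONDITION & SPEC =====
def Spec_longest_sub_seq (arr : List Int) (k : Int) (out : Int) : Prop := out = longest_sub_seq_alt arr k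
instance (arr : List Int) (k : Int) (out : Int) : Decidable (Spec_longest_sub_seq arr k out) := by unfold Spec_longest_sub_seq; infer_instance

-- ===== CLAIM (what is proved, stated in full; the proofs are below) =====
def Claim_equal_longest_sub_seq : Prop := ∀ (arr : List Int) (k : Int), Dom_longest_sub_seq arr k → Spec_longest_sub_seq arr k (longest_sub_seq arr k)

-- ===== LEMMAS AND PROOFS =====

theorem take_succ_set (l : List Int) (n : Nat) (x : Int) (h : n < l.length) :
    (l.set n x).take (n + 1) = l.take n ++ [x] := by
  rw [List.set_eq_take_append_cons_drop, if_pos h]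
  have hlen : (List.take n l).length = n := List.length_take_of_le (Nat.le_of_lt h)
  calc (List.take n l ++ x :: List.drop (n + 1) l).take (n + 1)
      = (List.take n l ++ x :: List.drop (n + 1) l).take ((List.take n l).length + 1) := by rw [hlen]
    _ = List.take n l ++ (x :: List.drop (n + 1) l).take 1 := List.take_length_add_append 1
    _ = List.take n l ++ [x] := by simp

-- running maximum with seed m (the clean form of A's es array)
def bMax (m : Int) : List Int → List Int
  | [] => []
  | x :: r => max m x :: bMax (max m x) r

theorem bScan_length (t : Int) (l : List Int) : (bScan t l).length = l.length := by
  induction l generalizing t with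
  | nil => rfl
  | cons v r ih => simp [bScan, ih]

-- A's sums loop computes buf.take (s+1) ++ bScan t arr
theorem sumsA_aux (arr : List Int) (t : Int) (buf : List Int) (s : Nat)
    (hlen : buf.length = s + 1 + arr.length) :
    ((PySem.List.enumerate arr s).foldl
      (fun (st : List Int × Int) iv =>
        (PySem.List.pySetD st.1 (iv.1 + 1) (st.2 + iv.2), st.2 + iv.2))
      (buf, t)).1 = buf.take (s + 1) ++ bScan t arr := by
  induction arr generalizing t buf s with
  | nil =>
    simp only [PySem.List.enumerate_nil, List.foldl_nil, bScan, List.append_nil]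
    rw [List.take_of_length_le (by simpa using hlen.le)]
  | cons v r ih =>
    have hlen' : buf.length = s + 1 + (r.length + 1) := by simpa using hlen
    rw [PySem.List.enumerate_cons]
    simp only [List.foldl_cons]
    have hcast : (s : Int) + 1 = ((s + 1 : Nat) : Int) := by push_cast; ring
    rw [hcast, PySem.List.pySetD_natCast]
    rw [ih (t + v) (buf.set (s + 1) (t + v)) (s + 1) (by rw [List.length_set]; omega)]
    rw [take_succ_set buf (s + 1) (t + v) (by omega)]
    simp [bScan]

-- A's es loop computes buf.take s ++ bMax m l
theorem esA_aux (l : List Int) (m : Int) (buf : List Int) (s : Nat)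
    (hlen : buf.length = s + l.length) :
    ((PySem.List.enumerate l s).foldl
      (fun (st : List Int × Int) iv =>
        (PySem.List.pySetD st.1 iv.1 (if iv.2 > st.2 then iv.2 else st.2),
         if iv.2 > st.2 then iv.2 else st.2))
      (buf, m)).1 = buf.take s ++ bMax m l := by
  induction l generalizing m buf s with
  | nil =>
    simp only [PySem.List.enumerate_nil, List.foldl_nil, bMax, List.append_nil]
    rw [List.take_of_length_le (by simpa using hlen.le)]
  | cons v r ih =>
    have hlen' : buf.length = s + (r.length + 1) := by simpa using hlen
    rw [PySem.List.enumerate_cons]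
    simp only [List.foldl_cons]
    have hmax : (if v > m then v else m) = max m v := by
      split
      · exact (max_eq_right (by omega)).symm
      · exact (max_eq_left (by omega)).symm
    have hcast : (s : Int) + 1 = ((s + 1 : Nat) : Int) := by push_cast; ring
    rw [hcast, PySem.List.pySetD_natCast, hmax]
    rw [ih (max m v) (buf.set s (max m v)) (s + 1) (by rw [List.length_set]; omega)]
    rw [take_succ_set buf s (max m v) (by omega)]
    simp [bMax]

theorem bMax_getD (m : Int) (l : List Int) (i : Nat) (h : i < l.length) :
    (bMax m l).getD i 0 = (l.take (i + 1)).foldl max m := by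
  induction l generalizing m i with
  | nil => simp at h
  | cons x r ih =>
    cases i with
    | zero => simp [bMax]
    | succ n =>
      have hih := ih (max m x) n (by simpa using h)
      simpa [bMax, List.take_succ_cons, List.foldl_cons, List.getD_eq_getElem?_getD] using hih

theorem foldl_max_ge_iff (l : List Int) (a p : Int) :
    p ≤ l.foldl max a ↔ p ≤ a ∨ ∃ y ∈ l, p ≤ y := by
  induction l generalizing a with
  | nil => simp
  | cons x r ih => simp [List.foldl_cons, ih, or_assoc]

-- the binary-search loop: with a monotone table it returns the least index with es[x] ≥ num
theorem dofindLoop_spec (es : List Int) (num j : Int)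
    (mono : ∀ x y : Int, 0 ≤ x → x ≤ y → y ≤ j →
      (PySem.List.pyGet? es x).getD 0 ≤ (PySem.List.pyGet? es y).getD 0) :
    ∀ (low high : Int), 0 ≤ low → high ≤ j → low ≤ high + 1 →
    (∀ x : Int, 0 ≤ x → x < low → (PySem.List.pyGet? es x).getD 0 < num) →
    (∀ x : Int, high < x → x ≤ j → num ≤ (PySem.List.pyGet? es x).getD 0) →
    0 ≤ dofindLoop es num low high ∧ dofindLoop es num low high ≤ j + 1 ∧
    (∀ x : Int, 0 ≤ x → x < dofindLoop es num low high → (PySem.List.pyGet? es x).getD 0 < num) ∧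
    (∀ x : Int, dofindLoop es num low high ≤ x → x ≤ j → num ≤ (PySem.List.pyGet? es x).getD 0) := by
  intro low high
  induction low, high using dofindLoop.induct es num with
  | case1 low high hle hge ih =>
    intro h0 hhj hlh hlow hhigh
    rw [dofindLoop, dif_pos hle, if_pos hge]
    have hb := PySem.Int.floordiv_two_mid_bounds (lo := low) (hi := high) hle
    apply ih h0 (by omega) (by omega) hlow
    intro x hx hxj
    rcases lt_or_ge high x with hgt | hle2
    · exact hhigh x hgt hxj
    · calc num ≤ (PySem.List.pyGet? es (PySem.Int.floordiv (low + high) 2)).getD 0 := hge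
        _ ≤ (PySem.List.pyGet? es x).getD 0 := mono _ x (by omega) (by omega) hxj
  | case2 low high hle hge ih =>
    intro h0 hhj hlh hlow hhigh
    rw [dofindLoop, dif_pos hle, if_neg hge]
    have hb := PySem.Int.floordiv_two_mid_bounds (lo := low) (hi := high) hle
    apply ih (by omega) hhj (by omega) _ hhigh
    intro x hx0 hx
    calc (PySem.List.pyGet? es x).getD 0
        ≤ (PySem.List.pyGet? es (PySem.Int.floordiv (low + high) 2)).getD 0 :=
          mono x _ hx0 (by omega) (by omega)
      _ < num := by omega
  | case3 low high hle =>
    intro h0 hhj hlh hlow hhigh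
    rw [dofindLoop, dif_neg hle]
    exact ⟨h0, by omega, hlow, fun x hx hxj => hhigh x (by omega) hxj⟩

theorem bFirst_some (l : List Int) (t : Int) (j : Int) (h : bFirst l t = some j) :
    ∃ jn : Nat, j = (jn : Int) ∧ jn < l.length ∧
      t ≤ l.getD jn 0 ∧ ∀ m : Nat, m < jn → l.getD m 0 < t := by
  induction l generalizing j with
  | nil => simp [bFirst] at h
  | cons x r ih =>
    by_cases hx : x ≥ t
    · simp only [bFirst, if_pos hx, Option.some.injEq] at h
      exact ⟨0, h.symm, by simp, by simpa using hx, by omega⟩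
    · simp only [bFirst, if_neg hx, Option.map_eq_some_iff] at h
      obtain ⟨j', hj', hjj⟩ := h
      obtain ⟨jn', hjn', hlt, hge, hall⟩ := ih j' hj'
      refine ⟨jn' + 1, by omega, by simpa using hlt, by simpa using hge, ?_⟩
      intro m hm
      cases m with
      | zero => simpa using (by omega : x < t)
      | succ m' => simpa using hall m' (by omega)

theorem bFirst_none (l : List Int) (t : Int) (h : bFirst l t = none) :
    ∀ y ∈ l, y < t := by
  induction l with
  | nil => simp
  | cons x r ih =>
    by_cases hx : x ≥ t
    · simp [bFirst, if_pos hx] at h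
    · simp only [bFirst, if_neg hx, Option.map_eq_none_iff] at h
      intro y hy
      rcases List.mem_cons.1 hy with rfl | hy
      · omega
      · exact ih h y hy

-- the per-endpoint agreement: A's binary search over the running maxima returns
-- exactly B's first matching raw prefix-sum index (coded as -1 for "none")
theorem per_i (T : List Int) (p : Int) (i : Nat)
    (h1 : 1 ≤ i) (hi : i < T.length + 1) :
    dofind (bMax 0 (0 :: T)) ((i : Int) - 1) p =
      (match bFirst ((0 :: T).take i) p with
       | some j => j
       | none => -1) := by
  -- the running-max table entry at x is the fold of max over the prefix of length x+1
  have hesAt : ∀ x : Nat, x < T.length + 1 →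
      (PySem.List.pyGet? (bMax 0 (0 :: T)) (x : Int)).getD 0
        = ((0 :: T).take (x + 1)).foldl max 0 := by
    intro x hx
    rw [PySem.List.pyGet?_of_nonneg _ (by omega)]
    simp only [Int.toNat_natCast]
    rw [← List.getD_eq_getElem?_getD]
    exact bMax_getD 0 (0 :: T) x (by simpa using hx)
  have hmono : ∀ x y : Int, 0 ≤ x → x ≤ y → y ≤ (i : Int) - 1 →
      (PySem.List.pyGet? (bMax 0 (0 :: T)) x).getD 0
        ≤ (PySem.List.pyGet? (bMax 0 (0 :: T)) y).getD 0 := by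
    intro x y hx hxy hyj
    have hxn : x = ((x.toNat : Nat) : Int) := by omega
    have hyn : y = ((y.toNat : Nat) : Int) := by omega
    rw [hxn, hyn, hesAt x.toNat (by omega), hesAt y.toNat (by omega)]
    have hsplit : (0 :: T).take (y.toNat + 1)
        = (0 :: T).take (x.toNat + 1) ++ ((0 :: T).take (y.toNat + 1)).drop (x.toNat + 1) := by
      conv_lhs => rw [← List.take_append_drop (x.toNat + 1) ((0 :: T).take (y.toNat + 1))]
      rw [List.take_take, Nat.min_eq_left (by omega)]
    rw [hsplit, List.foldl_append]
    exact (PySem.List.le_foldl_max _ _).1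
  have hgetDtake : ∀ m : Nat, m < i → ((0 :: T).take i).getD m 0 = (0 :: T).getD m 0 := by
    intro m hm
    rw [List.getD_eq_getElem?_getD, List.getD_eq_getElem?_getD, List.getElem?_take_of_lt hm]
  have hiff : ∀ x : Nat, x < i →
      (p ≤ (PySem.List.pyGet? (bMax 0 (0 :: T)) (x : Int)).getD 0
        ↔ ∃ m : Nat, m ≤ x ∧ p ≤ (0 :: T).getD m 0) := by
    intro x hx
    rw [hesAt x (by omega), foldl_max_ge_iff]
    constructor
    · rintro (hp0 | ⟨y, hy, hpy⟩)
      · exact ⟨0, by omega, by simpa using hp0⟩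
      · obtain ⟨m, hm, rfl⟩ := List.getElem_of_mem hy
        have hmx : m ≤ x := by simp [List.length_take] at hm; omega
        have hmlen : m < (0 :: T).length := by simp; omega
        refine ⟨m, hmx, ?_⟩
        rwa [List.getElem_take, ← List.getD_eq_getElem (0 :: T) 0 hmlen] at hpy
    · rintro ⟨m, hmx, hpm⟩
      right
      have hmlen : m < (0 :: T).length := by simp; omega
      have hpf : m < ((0 :: T).take (x + 1)).length := by simp [List.length_take]; omega
      have hmem := List.getElem_mem hpf
      rw [List.getElem_take] at hmem
      exact ⟨_, hmem, by rwa [List.getD_eq_getElem (0 :: T) 0 hmlen] at hpm⟩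
  -- run the binary-search loop specification on [0, i-1]
  obtain ⟨hr0, hrj, hrlow, hrhigh⟩ :=
    dofindLoop_spec (bMax 0 (0 :: T)) p ((i : Int) - 1) hmono 0 ((i : Int) - 1)
      le_rfl (le_refl _) (by omega)
      (fun x hx0 hx => absurd hx (by omega))
      (fun x hx hxj => absurd (lt_of_lt_of_le hx hxj) (by omega))
  rcases hbf : bFirst ((0 :: T).take i) p with _ | jv
  · -- no prefix sum meets the threshold: the loop ran off the right end, A returns -1
    have hnone := bFirst_none _ _ hbf
    have hgt : ¬ dofindLoop (bMax 0 (0 :: T)) p 0 ((i : Int) - 1) ≤ (i : Int) - 1 := by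
      intro hle
      have hp := hrhigh _ le_rfl hle
      set r := dofindLoop (bMax 0 (0 :: T)) p 0 ((i : Int) - 1) with hrdef
      have hrn : r = ((r.toNat : Nat) : Int) := by omega
      rw [hrn] at hp
      obtain ⟨m, hmr, hpm⟩ := (hiff r.toNat (by omega)).1 hp
      have hmlen : m < (0 :: T).length := by simp; omega
      have hpf : m < ((0 :: T).take i).length := by simp [List.length_take]; omega
      have hmem := List.getElem_mem hpf
      rw [List.getElem_take] at hmem
      have := hnone _ hmem
      rw [← List.getD_eq_getElem (0 :: T) 0 hmlen] at this
      omega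
    simp only [dofind]
    rw [if_neg hgt]
  · -- the first matching prefix-sum index jn: the loop lands exactly on it
    obtain ⟨jn, rfl, hjn_lt, hge, hall⟩ := bFirst_some _ _ _ hbf
    have hjn_i : jn < i := by simp [List.length_take] at hjn_lt; omega
    rw [hgetDtake jn hjn_i] at hge
    set r := dofindLoop (bMax 0 (0 :: T)) p 0 ((i : Int) - 1) with hrdef
    have hrjn : r = (jn : Int) := by
      rcases lt_trichotomy r (jn : Int) with hlt | heq | hgt
      · exfalso
        have hp := hrhigh r le_rfl (by omega)
        have hrn : r = ((r.toNat : Nat) : Int) := by omega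
        rw [hrn] at hp
        obtain ⟨m, hmr, hpm⟩ := (hiff r.toNat (by omega)).1 hp
        have := hall m (by omega)
        rw [hgetDtake m (by omega)] at this
        omega
      · exact heq
      · exfalso
        have hlt2 := hrlow (jn : Int) (by omega) (by omega)
        have : p ≤ (PySem.List.pyGet? (bMax 0 (0 :: T)) ((jn : Nat) : Int)).getD 0 :=
          (hiff jn hjn_i).2 ⟨jn, le_rfl, hge⟩
        omega
    have hle : (jn : Int) ≤ (i : Int) - 1 := by omega
    simp only [dofind]
    rw [← hrdef, hrjn, if_pos hle]

theorem longest_sub_seq_spec' (arr : List Int) (k : Int) :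
    longest_sub_seq arr k = longest_sub_seq_alt arr k := by
  have hsums' : ((PySem.List.enumerate arr).foldl
      (fun (st : List Int × Int) iv =>
        (PySem.List.pySetD st.1 (iv.1 + 1) (st.2 + iv.2), st.2 + iv.2))
      (List.replicate (arr.length + 1) 0, 0)).1 = 0 :: bScan 0 arr := by
    have h := sumsA_aux arr 0 (List.replicate (arr.length + 1) 0) 0 (by simp; omega)
    simpa [List.take_replicate] using h
  have hes' : ((PySem.List.enumerate (0 :: bScan 0 arr)).foldl
      (fun (st : List Int × Int) iv =>
        (PySem.List.pySetD st.1 iv.1 (if iv.2 > st.2 then iv.2 else st.2),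
         if iv.2 > st.2 then iv.2 else st.2))
      (List.replicate (arr.length + 1) 0, 0)).1 = bMax 0 (0 :: bScan 0 arr) := by
    have h := esA_aux (0 :: bScan 0 arr) 0 (List.replicate (arr.length + 1) 0) 0
      (by simp [bScan_length])
    simpa using h
  simp only [longest_sub_seq, longest_sub_seq_alt]
  rw [hsums', hes']
  have hlen : (((0 :: bScan 0 arr) : List Int).length : Int) = (arr.length : Int) + 1 := by
    simp [bScan_length]
  rw [hlen]
  apply PySem.List.foldl_congr_mem
  intro acc i hi
  obtain ⟨hi1, hi2⟩ := PySem.List.mem_pyRange_one.1 hi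
  have hiN : i = ((i.toNat : Nat) : Int) := by omega
  rw [hiN]
  simp only [Int.toNat_natCast]
  have hper := per_i (bScan 0 arr)
      ((PySem.List.pyGet? (0 :: bScan 0 arr) ((i.toNat : Nat) : Int)).getD 0 - k)
      i.toNat (by omega) (by rw [bScan_length]; omega)
  rw [hper]
  rcases hbf : bFirst ((0 :: bScan 0 arr).take i.toNat)
      ((PySem.List.pyGet? (0 :: bScan 0 arr) ((i.toNat : Nat) : Int)).getD 0 - k) with _ | jv
  · simp
  · obtain ⟨jn, rfl, -, -, -⟩ := bFirst_some _ _ _ hbf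
    simp [show ((jn : Nat) : Int) ≠ -1 by omega]

-- ===== VERDICT (by name: the statement is the Claim_ definition above) =====
theorem longest_sub_seq_spec : Claim_equal_longest_sub_seq := by
  intro arr k _
  unfold Spec_longest_sub_seq
  exact longest_sub_seq_spec' arr k
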